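-- pv_equiv track=rewrite | github.com/tjx578/TUYUL-FX-WOLF-15LAYER-SYSTEM | constitution/phase1_to_phase2_bridge_adapter.py | _derive_warmup
-- ===== SOURCE A (Python) =====
-- from typing import Any
--
-- def _derive_warmup(
--     l1: dict[str, Any],
--     l2: dict[str, Any],
--     l3: dict[str, Any],
-- ) -> str:
--     """Derive aggregated warmup state (worst-case wins).
--
--     Warmup priority (worst → best):
--       INSUFFICIENT > PARTIAL > READY
--     """
--     priority = {"READY": 0, "PARTIAL": 1, "INSUFFICIENT": 2}
--     worst_idx = 0
--     for layer_out in (l1, l2, l3):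
--         ws = str(layer_out.get("warmup_state", "READY"))
--         idx = priority.get(ws, 0)
--         if idx > worst_idx:
--             worst_idx = idx
--     for name, idx in priority.items():
--         if idx == worst_idx:
--             return name
--     return "READY"
-- ===== SOURCE B (Python) =====
-- from typing import Any
--
-- def _derive_warmup(
--     l1: dict[str, Any],
--     l2: dict[str, Any],
--     l3: dict[str, Any],
-- ) -> str:
--     """Worst-case warmup state via ordered sentinel membership checks."""
--     states = [str(l.get("warmup_state", "READY")) for l in (l1, l2, l3)]
--     if "INSUFFICIENT" in states:
--         return "INSUFFICIENT"
--     if "PARTIAL" in states: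
--         return "PARTIAL"
--     return "READY"
-- ===== Notes on version B (the rewrite author's own statement) =====
-- stated objective: simpler
-- what changed: Replaced the numeric priority dict, the worst-index max accumulator and the reverse-lookup loop over priority.items() with a direct ordered membership check on the three warmup strings.
import Mathlib
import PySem

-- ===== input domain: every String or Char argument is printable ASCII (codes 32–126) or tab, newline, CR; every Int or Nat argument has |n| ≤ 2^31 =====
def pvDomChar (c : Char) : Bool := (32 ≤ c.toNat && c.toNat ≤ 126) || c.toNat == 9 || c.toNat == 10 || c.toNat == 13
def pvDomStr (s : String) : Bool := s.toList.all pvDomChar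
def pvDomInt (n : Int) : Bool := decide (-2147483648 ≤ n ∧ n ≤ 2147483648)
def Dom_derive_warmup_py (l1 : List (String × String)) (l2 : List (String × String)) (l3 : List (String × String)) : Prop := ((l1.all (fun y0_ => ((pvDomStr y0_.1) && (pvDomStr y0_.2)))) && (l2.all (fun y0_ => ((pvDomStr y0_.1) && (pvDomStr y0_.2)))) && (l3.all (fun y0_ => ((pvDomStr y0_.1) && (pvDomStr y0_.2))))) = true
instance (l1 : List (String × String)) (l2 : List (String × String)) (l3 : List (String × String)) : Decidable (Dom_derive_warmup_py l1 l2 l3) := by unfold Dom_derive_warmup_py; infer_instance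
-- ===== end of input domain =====

-- B replaces A's priority dict + max accumulator + reverse-lookup loop with ordered sentinel membership checks (objective: simpler).

-- ===== PORT A =====
-- the literal dict `priority = {"READY":0, "PARTIAL":1, "INSUFFICIENT":2}`
def pvPriority : PySem.Dict String Int :=
  PySem.Dict.mk [("READY", 0), ("PARTIAL", 1), ("INSUFFICIENT", 2)]

def derive_warmup_py (l1 : List (String × String)) (l2 : List (String × String)) (l3 : List (String × String)) : String :=
  -- worst_idx accumulation loop over (l1, l2, l3)
  let worst_idx : Int :=
    [l1, l2, l3].foldl (fun worst layer_out =>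
      let ws := PySem.Dict.getD (PySem.Dict.mk layer_out) "warmup_state" "READY"
      let idx := PySem.Dict.getD pvPriority ws 0
      if idx > worst then idx else worst) 0
  -- reverse-lookup loop `for name, idx in priority.items(): if idx == worst_idx: return name`
  match pvPriority.items.find? (fun p => p.2 == worst_idx) with
  | some p => p.1
  | none => "READY"

-- ===== PORT B =====
def derive_warmup_py_alt (l1 : List (String × String)) (l2 : List (String × String)) (l3 : List (String × String)) : String :=
  let states := [l1, l2, l3].map (fun l => PySem.Dict.getD (PySem.Dict.mk l) "warmup_state" "READY")
  if states.contains "INSUFFICIENT" then "INSUFFICIENT"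
  else if states.contains "PARTIAL" then "PARTIAL"
  else "READY"

-- ===== PRECONDITION & SPEC =====
def Spec_derive_warmup_py (l1 : List (String × String)) (l2 : List (String × String)) (l3 : List (String × String)) (out : String) : Prop := out = derive_warmup_py_alt l1 l2 l3
instance (l1 : List (String × String)) (l2 : List (String × String)) (l3 : List (String × String)) (out : String) : Decidable (Spec_derive_warmup_py l1 l2 l3 out) := by unfold Spec_derive_warmup_py; infer_instance

-- ===== CLAIM (what is proved, stated in full; the proofs are below) =====
def Claim_equal_derive_warmup_py : Prop := ∀ (l1 : List (String × String)) (l2 : List (String × String)) (l3 : List (String × String)), Dom_derive_warmup_py l1 l2 l3 → Spec_derive_warmup_py l1 l2 l3 (derive_warmup_py l1 l2 l3)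

-- ===== LEMMAS AND PROOFS =====

-- both ports only depend on the three looked-up warmup strings
set_option maxRecDepth 4000 in
theorem core_eq (a b c : String) :
    (let worst_idx : Int :=
       [a, b, c].foldl (fun worst ws =>
         let idx := PySem.Dict.getD pvPriority ws 0
         if idx > worst then idx else worst) 0
     match pvPriority.items.find? (fun p => p.2 == worst_idx) with
     | some p => p.1
     | none => "READY")
    =
    (if [a, b, c].contains "INSUFFICIENT" then "INSUFFICIENT"
     else if [a, b, c].contains "PARTIAL" then "PARTIAL"
     else "READY") := by
  have pr : ∀ s : String, PySem.Dict.getD pvPriority s 0 =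
      if "INSUFFICIENT" = s then 2 else if "PARTIAL" = s then 1 else 0 := by
    intro s
    by_cases h1 : "INSUFFICIENT" = s
    · subst h1; decide
    by_cases h2 : "PARTIAL" = s
    · subst h2; decide
    by_cases h3 : "READY" = s
    · subst h3; decide
    · simp [pvPriority, PySem.Dict.getD, PySem.Dict.get?, beq_iff_eq, h1, h2, h3]
  simp only [List.foldl, pr, List.contains_cons, List.contains_nil]
  by_cases ha1 : "INSUFFICIENT" = a <;> by_cases hb1 : "INSUFFICIENT" = b <;>
    by_cases hc1 : "INSUFFICIENT" = c <;>
    by_cases ha2 : "PARTIAL" = a <;> by_cases hb2 : "PARTIAL" = b <;>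
    by_cases hc2 : "PARTIAL" = c <;>
    subst_vars <;> simp_all <;> decide

theorem derive_eq (l1 l2 l3 : List (String × String)) :
    derive_warmup_py l1 l2 l3 = derive_warmup_py_alt l1 l2 l3 := by
  unfold derive_warmup_py derive_warmup_py_alt
  simpa using core_eq
    (PySem.Dict.getD (PySem.Dict.mk l1) "warmup_state" "READY")
    (PySem.Dict.getD (PySem.Dict.mk l2) "warmup_state" "READY")
    (PySem.Dict.getD (PySem.Dict.mk l3) "warmup_state" "READY")

-- ===== VERDICT (by name: the statement is the Claim_ definition above) =====
theorem derive_warmup_py_spec : Claim_equal_derive_warmup_py := by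
  intro l1 l2 l3 _
  exact derive_eq l1 l2 l3
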